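-- pv_equiv track=rewrite | github.com/qjupinu/cfg | cfg.py | derive_string
-- ===== SOURCE A (Python) =====
-- TERMINALS = {'a', 'b'}
--
-- def derive_string(target):
--     if not is_member(target):
--         return None
--
--     derivation = ['S']
--     current = 'S'
--
--     # empty string case
--     if target == '':
--         derivation.append('epsilon')
--         return derivation
--
--     # count needed 'a's and apply S -> aSb rule that many times
--     n = target.count('a')
--     for cnti in range(n):
--         current = current.replace('S', 'aSb', 1)
--         derivation.append(current)
--
--     # now apply S -> epsilon rule
--     current = current.replace("S", "epsilon")
--     if "epsilon" in current:
--         current = current.replace("epsilon", "")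
--     derivation.append(current)
--
--     return derivation
--
-- def is_member(string):
--     if string == '':
--         return True
--
--     # check for equal number of a's and b's
--     # all a's before all b's
--     # nothing else allowed
--
--     if not all(char in TERMINALS for char in string):
--         return False
--
--     a_total = string.count('a')
--     b_total = string.count('b')
--     if a_total != b_total:
--         return False
--
--     try:
--         first_b_id = string.index('b')
--         return 'a' not in string[first_b_id:]
--     except ValueError:
--         return string == ''
-- ===== SOURCE B (Python) =====
-- def derive_string(target):
--     n = target.count('a')
--     if target != 'a' * n + 'b' * n:
--         return None
--     if target == '':
--         return ['S', 'epsilon']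
--     return ['a' * i + 'S' + 'b' * i for i in range(n + 1)] + [target]
-- ===== Notes on version B (the rewrite author's own statement) =====
-- stated objective: simpler
-- what changed: Membership is decided by one canonical-string comparison (target == 'a'*n+'b'*n with n = target.count('a')) instead of the char-set/count/first-b-index scans, and the derivation is built directly by index ('a'*i+'S'+'b'*i for i in range(n+1)) instead of repeatedly mutating a running string with replace.
import Mathlib
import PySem

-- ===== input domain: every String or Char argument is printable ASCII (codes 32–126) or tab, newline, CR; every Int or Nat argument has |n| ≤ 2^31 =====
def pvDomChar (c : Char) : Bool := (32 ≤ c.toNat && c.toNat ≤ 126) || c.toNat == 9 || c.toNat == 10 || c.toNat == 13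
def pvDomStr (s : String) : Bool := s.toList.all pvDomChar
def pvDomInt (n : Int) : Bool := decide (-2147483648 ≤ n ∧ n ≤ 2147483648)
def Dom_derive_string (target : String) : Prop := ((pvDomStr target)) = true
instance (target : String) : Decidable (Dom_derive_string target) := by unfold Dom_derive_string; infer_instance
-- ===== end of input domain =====

-- B replaces the count/index/scan membership test by one canonical-string comparison and builds each
-- derivation step directly from its index instead of mutating a running string (objective: simpler).

-- ===== PORT A =====
-- TERMINALS = {'a', 'b'}
def pvTERMINALS : List Char := PySem.Set.ofList ['a', 'b']

-- hand port of `current.replace(old, new, 1)` (replace FIRST occurrence only; exact for the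
-- nonempty pattern 'S' used here): find the first occurrence and splice.
def pvReplaceOnce (s old new : List Char) : List Char :=
  let i := PySem.Chars.find s old
  if i = -1 then s else s.take i.toNat ++ new ++ s.drop (i.toNat + old.length)

-- is_member, on code points; string.index('b') / the ValueError branch is ported through
-- PySem.Chars.find ( = -1 exactly where Python raises ValueError).
def pvIsMember (s : List Char) : Bool :=
  if s = [] then true
  else if ¬ (s.all (fun c => c ∈ pvTERMINALS)) then false
  else
    let a_total := PySem.Chars.count s ['a']
    let b_total := PySem.Chars.count s ['b']
    if a_total ≠ b_total then false
    else
      let first_b_id := PySem.Chars.find s ['b']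
      if first_b_id = -1 then decide (s = [])
      else !(PySem.Chars.isIn ['a'] (PySem.List.slice s (some first_b_id) none))

-- the main body of A, on code points (the derivation kept as a list of char lists)
def pvDeriveA (s : List Char) : Option (List (List Char)) :=
  if !(pvIsMember s) then none
  else
    let derivation : List (List Char) := [['S']]
    let current : List Char := ['S']
    if s = [] then some (derivation ++ ["epsilon".toList])
    else
      let n := PySem.Chars.count s ['a']
      let st := (PySem.List.pyRange 0 (n : Int) 1).foldl
        (fun (st : List Char × List (List Char)) _ =>
          let c := pvReplaceOnce st.1 ['S'] "aSb".toList
          (c, st.2 ++ [c])) (current, derivation)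
      let current := PySem.Chars.replace st.1 ['S'] "epsilon".toList
      let current := if PySem.Chars.isIn "epsilon".toList current then
          PySem.Chars.replace current "epsilon".toList [] else current
      some (st.2 ++ [current])

def derive_string (target : String) : Option (List String) :=
  (pvDeriveA target.toList).map (List.map String.ofList)

-- ===== PORT B =====
def derive_string_alt (target : String) : Option (List String) :=
  let n := PySem.Chars.count target.toList ['a']
  if target.toList ≠ List.replicate n 'a' ++ List.replicate n 'b' then none
  else if target.toList = [] then some ["S", "epsilon"]
  else some (((List.range (n + 1)).map
      (fun i => String.ofList (List.replicate i 'a' ++ 'S' :: List.replicate i 'b'))) ++ [target])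

-- ===== PRECONDITION & SPEC =====
def Spec_derive_string (target : String) (out : Option (List String)) : Prop := out = derive_string_alt target
instance (target : String) (out : Option (List String)) : Decidable (Spec_derive_string target out) := by unfold Spec_derive_string; infer_instance

-- ===== CLAIM (what is proved, stated in full; the proofs are below) =====
def Claim_equal_derive_string : Prop := ∀ (target : String), Dom_derive_string target → Spec_derive_string target (derive_string target)

-- ===== LEMMAS AND PROOFS =====

def pvCanon (n : Nat) : List Char := List.replicate n 'a' ++ List.replicate n 'b'

theorem pv_singleton_prefix (c : Char) (l : List Char) : [c] <+: l ↔ l.head? = some c := by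
  cases l with
  | nil => simp
  | cons h t =>
    constructor
    · rintro ⟨r, hr⟩; simp at hr; simp [hr.1]
    · intro h'; simp at h'; exact ⟨t, by simp [h']⟩

theorem pv_singleton_prefix_drop (c : Char) (l : List Char) (j : Nat) :
    [c] <+: l.drop j ↔ l[j]? = some c := by
  rw [pv_singleton_prefix, List.head?_drop]

theorem pv_count_go_single (c : Char) : ∀ (l : List Char) (fuel acc : Nat), l.length ≤ fuel →
    PySem.Chars.count.go [c] fuel l acc = acc + List.count c l := by
  intro l
  induction l with
  | nil => intro fuel acc _; cases fuel <;> simp [PySem.Chars.count.go]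
  | cons h t ih =>
    intro fuel acc hf
    cases fuel with
    | zero => simp at hf
    | succ f =>
      simp only [PySem.Chars.count.go]
      by_cases hc : c = h
      · subst hc
        simp [List.isPrefixOf]
        rw [ih f (acc+1) (by simpa using hf)]
        omega
      · simp [List.isPrefixOf, Ne.symm hc]
        rw [ih f acc (by simpa using hf)]
        simp [hc]

theorem pv_count_single (c : Char) (s : List Char) : PySem.Chars.count s [c] = List.count c s := by
  simp [PySem.Chars.count]
  rw [pv_count_go_single c s s.length 0 le_rfl]
  omega

theorem pv_find_single (c : Char) (u v : List Char) (hu : c ∉ u) :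
    PySem.Chars.find (u ++ c :: v) [c] = (u.length : Int) := by
  set s := u ++ c :: v with hs
  have hmem : c ∈ s := by simp [hs]
  have hnn : 0 ≤ PySem.Chars.find s [c] := by
    rw [PySem.Chars.find_nonneg_iff]
    exact (List.singleton_infix_iff c s).2 hmem
  obtain ⟨hpre, hmin⟩ := PySem.Chars.find_spec (s := s) (sub := [c]) hnn
  set t := (PySem.Chars.find s [c]).toNat with ht
  have hgt : s[t]? = some c := (pv_singleton_prefix_drop c s t).1 hpre
  have hut : s[u.length]? = some c := by
    rw [← pv_singleton_prefix_drop]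
    have : s.drop u.length = c :: v := by simp [hs]
    simp [this]
  have htle : t ≤ u.length := by
    by_contra h
    exact hmin u.length (by omega) ((pv_singleton_prefix_drop c s u.length).2 hut)
  have hteq : t = u.length := by
    rcases Nat.lt_or_ge t u.length with hlt | hge
    · exfalso
      have : s[t]? = u[t]? := by
        rw [hs]; exact (List.getElem?_append_left hlt)
      rw [this] at hgt
      exact hu (List.mem_of_getElem? hgt)
    · omega
  omega

theorem pv_go_skip (old new : List Char) (o : Char) (ho : old.head? = some o) :
    ∀ (n : Nat) (c : Char), c ≠ o → ∀ (fuel : Nat) (t acc : List Char),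
    PySem.Chars.replace.go old new (n + fuel) (List.replicate n c ++ t) acc
      = PySem.Chars.replace.go old new fuel t (List.replicate n c ++ acc) := by
  intro n
  induction n with
  | zero => simp
  | succ m ih =>
    intro c hc fuel t acc
    have hrep : List.replicate (m+1) c ++ t = c :: (List.replicate m c ++ t) := by
      simp [List.replicate_succ]
    have hfuel : m + 1 + fuel = (m + fuel) + 1 := by omega
    rw [hrep, hfuel]
    have hpre : old.isPrefixOf (c :: (List.replicate m c ++ t)) = false := by
      cases old with
      | nil => simp at ho
      | cons x xs =>
        simp at ho
        subst ho
        simp [List.isPrefixOf]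
        intro h; exact absurd h.symm hc
    rw [PySem.Chars.replace.go]
    simp only [hpre, Bool.false_eq_true, if_false]
    rw [ih c hc fuel t (c :: acc)]
    congr 1
    simp [List.replicate_succ']

theorem pv_go_end (old new : List Char) (fuel : Nat) (acc : List Char) :
    PySem.Chars.replace.go old new fuel [] acc = acc.reverse := by
  cases fuel <;> simp [PySem.Chars.replace.go]

theorem pv_go_hit (o : Char) (os new v acc : List Char) (fuel : Nat) :
    PySem.Chars.replace.go (o :: os) new (fuel + 1) ((o :: os) ++ v) acc
      = PySem.Chars.replace.go (o :: os) new fuel v (new.reverse ++ acc) := by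
  have hpre : (o :: os).isPrefixOf ((o :: os) ++ v) = true := by
    rw [List.isPrefixOf_iff_prefix]; exact List.prefix_append _ _
  rw [show (o :: os) ++ v = o :: (os ++ v) from rfl]
  rw [PySem.Chars.replace.go]
  rw [show o :: (os ++ v) = (o :: os) ++ v from rfl]
  simp only [hpre, if_true]
  congr 1
  simp

theorem pv_replace_rep_mid (n m : Nat) (c d o : Char) (os new : List Char)
    (hc : c ≠ o) (hd : d ≠ o) :
    PySem.Chars.replace (List.replicate n c ++ (o :: os) ++ List.replicate m d) (o :: os) new
      = List.replicate n c ++ new ++ List.replicate m d := by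
  have hlen : (List.replicate n c ++ (o :: os) ++ List.replicate m d).length
      = n + ((os.length + m) + 1) := by simp
  rw [PySem.Chars.replace]
  simp only [List.isEmpty_cons, Bool.false_eq_true, if_false]
  rw [hlen]
  rw [List.append_assoc]
  rw [pv_go_skip (o :: os) new o rfl n c hc ((os.length + m) + 1) _ []]
  rw [pv_go_hit o os new (List.replicate m d) _ (os.length + m)]
  have hcomm : os.length + m = m + os.length := by omega
  rw [hcomm]
  rw [← List.append_nil (List.replicate m d)]
  rw [pv_go_skip (o :: os) new o rfl m d hd os.length [] _]
  rw [pv_go_end]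
  simp

theorem pv_member_iff (s : List Char) :
    pvIsMember s = true ↔ s = pvCanon (List.count 'a' s) := by
  by_cases hnil : s = []
  · subst hnil; simp [pvIsMember, pvCanon]
  constructor
  · intro hm
    unfold pvIsMember at hm
    simp only [hnil, if_false] at hm
    by_cases hall : s.all (fun c => c ∈ pvTERMINALS) = true
    swap
    · simp [hall] at hm
    simp only [hall, not_true, if_false] at hm
    rw [pv_count_single, pv_count_single] at hm
    by_cases hcnt : List.count 'a' s = List.count 'b' s
    swap
    · simp [hcnt] at hm
    simp only [hcnt, ne_eq, not_true_eq_false, if_false] at hm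
    by_cases hfb : PySem.Chars.find s ['b'] = -1
    · simp [hfb] at hm
    simp only [hfb, if_false] at hm
    have hnn : 0 ≤ PySem.Chars.find s ['b'] := by
      rcases PySem.Chars.neg_one_le_find (s := s) (sub := ['b']) |>.lt_or_eq with h | h
      · omega
      · exact absurd h.symm hfb
    obtain ⟨hpre, hmin⟩ := PySem.Chars.find_spec (s := s) (sub := ['b']) hnn
    set k := (PySem.Chars.find s ['b']).toNat with hk
    have hsk : s[k]? = some 'b' := (pv_singleton_prefix_drop _ _ _).1 hpre
    have hklen : k < s.length := by
      by_contra h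
      rw [List.getElem?_eq_none (by omega)] at hsk
      simp at hsk
    have hslice : PySem.List.slice s (some (PySem.Chars.find s ['b'])) none = s.drop k := by
      rw [PySem.List.slice_from _ hnn]
    rw [hslice] at hm
    have hnoA : 'a' ∉ s.drop k := by
      intro hmem
      have : PySem.Chars.isIn ['a'] (s.drop k) = true := by
        rw [PySem.Chars.isIn_iff_infix]
        exact (List.singleton_infix_iff _ _).2 hmem
      simp [this] at hm
    have hab : ∀ c ∈ s, c = 'a' ∨ c = 'b' := by
      intro c hc
      have := List.all_eq_true.mp hall c hc
      simpa [pvTERMINALS, PySem.Set.mem_ofList] using this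
    have hchar : ∀ (j : Nat) (hj : j < s.length), s[j] = if j < k then 'a' else 'b' := by
      intro j hj
      by_cases hjk : j < k
      · have hnb : s[j] ≠ 'b' := by
          intro hb
          exact hmin j hjk ((pv_singleton_prefix_drop _ _ _).2 (by rw [List.getElem?_eq_getElem hj, hb]))
        rcases hab s[j] (List.getElem_mem hj) with h | h
        · simp [hjk, h]
        · exact absurd h hnb
      · have hna : s[j] ≠ 'a' := by
          intro ha
          refine hnoA ?_
          have hget : (s.drop k)[j - k]? = some 'a' := by
            rw [List.getElem?_drop]
            rw [show k + (j - k) = j by omega]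
            rw [List.getElem?_eq_getElem hj, ha]
          exact List.mem_of_getElem? hget
        rcases hab s[j] (List.getElem_mem hj) with h | h
        · exact absurd h hna
        · simp [hjk, h]
    have hform : s = List.replicate k 'a' ++ List.replicate (s.length - k) 'b' := by
      apply List.ext_getElem
      · simp; omega
      · intro j hj hj'
        rw [hchar j hj]
        by_cases hjk : j < k
        · simp [hjk, List.length_replicate]
        · simp [hjk, List.getElem_append, List.length_replicate]
    have hca : List.count 'a' s = k := by
      rw [hform]
      simp [List.count_replicate]
    have hcb : List.count 'b' s = s.length - k := by
      rw [hform]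
      simp [List.count_replicate]
    have hlen2 : s.length - k = k := by
      rw [hca, hcb] at hcnt
      omega
    rw [hca]
    unfold pvCanon
    rw [hform, hlen2]
  · intro hcan
    set n := List.count 'a' s with hn
    have hlen : s.length = 2 * n := by rw [hcan]; simp [pvCanon]; omega
    have hnpos : 0 < n := by
      rcases Nat.eq_zero_or_pos n with h | h
      · exfalso; apply hnil; have := hlen; rw [h] at this; simpa using List.eq_nil_of_length_eq_zero (by omega)
      · exact h
    have hsplit : s = List.replicate n 'a' ++ 'b' :: List.replicate (n - 1) 'b' := by
      rw [hcan]
      unfold pvCanon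
      congr 1
      rw [show n = (n - 1) + 1 by omega]
      simp [List.replicate_succ]
    have hfind : PySem.Chars.find s ['b'] = (n : Int) := by
      have := pv_find_single 'b' (List.replicate n 'a') (List.replicate (n - 1) 'b')
        (by simp)
      rw [← hsplit] at this
      simpa using this
    have hall : s.all (fun c => c ∈ pvTERMINALS) = true := by
      rw [hcan]
      simp [pvCanon, pvTERMINALS, PySem.Set.mem_ofList]
    have hca : PySem.Chars.count s ['a'] = n := by
      rw [pv_count_single, hcan]
      simp [pvCanon, List.count_replicate]
    have hcb : PySem.Chars.count s ['b'] = n := by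
      rw [pv_count_single, hcan]
      simp [pvCanon, List.count_replicate]
    have hdrop : s.drop n = List.replicate n 'b' := by
      rw [hcan]
      unfold pvCanon
      simp
    have hisin : PySem.Chars.isIn ['a'] (List.replicate n 'b') = false := by
      rw [PySem.Chars.isIn_eq_false_iff]
      intro hinf
      have := (List.singleton_infix_iff 'a' (List.replicate n 'b')).1 hinf
      simp at this
    unfold pvIsMember
    rw [if_neg hnil]
    simp only [hall, not_true, if_false]
    rw [hca, hcb]
    simp only [ne_eq, not_true_eq_false, if_false]
    rw [hfind]
    rw [if_neg (by omega)]
    rw [PySem.List.slice_from _ (by positivity)]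
    simp only [Int.toNat_natCast, hdrop, hisin]
    rfl

theorem pv_step (i : Nat) :
    pvReplaceOnce (List.replicate i 'a' ++ 'S' :: List.replicate i 'b') ['S'] "aSb".toList
      = List.replicate (i+1) 'a' ++ 'S' :: List.replicate (i+1) 'b' := by
  have hfind := pv_find_single 'S' (List.replicate i 'a') (List.replicate i 'b') (by simp)
  unfold pvReplaceOnce
  simp only [hfind, List.length_replicate]
  rw [if_neg (by omega)]
  have htake : (List.replicate i 'a' ++ 'S' :: List.replicate i 'b').take i = List.replicate i 'a' := by
    rw [List.take_left' (by simp)]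
  have hdrop : (List.replicate i 'a' ++ 'S' :: List.replicate i 'b').drop (i + 1) = List.replicate i 'b' := by
    rw [show List.replicate i 'a' ++ 'S' :: List.replicate i 'b'
        = (List.replicate i 'a' ++ ['S']) ++ List.replicate i 'b' by simp]
    rw [List.drop_left' (by simp)]
  simp only [Int.toNat_natCast, List.length_cons, List.length_nil, htake, hdrop]
  show List.replicate i 'a' ++ ['a','S','b'] ++ List.replicate i 'b'
      = List.replicate (i+1) 'a' ++ 'S' :: List.replicate (i+1) 'b'
  rw [List.replicate_succ' (n := i) (a := 'a'), List.replicate_succ (n := i) (a := 'b')]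
  simp

theorem pv_loop (n : Nat) :
    (List.range n).foldl
      (fun (st : List Char × List (List Char)) _ =>
        (pvReplaceOnce st.1 ['S'] "aSb".toList, st.2 ++ [pvReplaceOnce st.1 ['S'] "aSb".toList]))
      (['S'], [['S']])
      = (List.replicate n 'a' ++ 'S' :: List.replicate n 'b',
         (List.range (n+1)).map (fun i => List.replicate i 'a' ++ 'S' :: List.replicate i 'b')) := by
  induction n with
  | zero => simp
  | succ m ih =>
    rw [List.range_succ, List.foldl_append, ih]
    simp only [List.foldl_cons, List.foldl_nil]
    rw [pv_step m]
    rw [List.range_succ (n := m + 1)]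
    simp

-- ===== VERDICT (by name: the statement is the Claim_ definition above) =====
theorem derive_string_spec : Claim_equal_derive_string := by
  intro target _
  unfold Spec_derive_string derive_string derive_string_alt
  set s := target.toList with hs
  have hcnt : PySem.Chars.count s ['a'] = List.count 'a' s := pv_count_single 'a' s
  set n := List.count 'a' s with hn
  by_cases hmem : s = pvCanon n
  · -- member: B's guard is false
    rw [hcnt]
    rw [if_neg (by simpa [pvCanon] using hmem)]
    have hA : pvIsMember s = true := (pv_member_iff s).2 hmem
    unfold pvDeriveA
    rw [hA]
    simp only [Bool.not_true, Bool.false_eq_true, if_false]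
    by_cases hnil : s = []
    · rw [if_pos hnil, if_pos hnil]
      rfl
    · rw [if_neg hnil, if_neg hnil]
      have hnpos : 0 < n := by
        rcases Nat.eq_zero_or_pos n with h | h
        · exfalso; apply hnil
          rw [hmem, h]; rfl
        · exact h
      rw [PySem.List.pyRange_zero_natCast, List.foldl_map, hcnt, pv_loop n]
      simp only
      -- first replace: S -> epsilon
      have h1 : PySem.Chars.replace (List.replicate n 'a' ++ 'S' :: List.replicate n 'b')
          ['S'] "epsilon".toList
          = List.replicate n 'a' ++ "epsilon".toList ++ List.replicate n 'b' := by
        have := pv_replace_rep_mid n n 'a' 'b' 'S' [] "epsilon".toList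
          (by decide) (by decide)
        simpa using this
      rw [h1]
      have hisin : PySem.Chars.isIn "epsilon".toList
          (List.replicate n 'a' ++ "epsilon".toList ++ List.replicate n 'b') = true := by
        rw [PySem.Chars.isIn_iff_infix]
        exact ⟨List.replicate n 'a', List.replicate n 'b', by simp⟩
      rw [if_pos hisin]
      have h2 : PySem.Chars.replace (List.replicate n 'a' ++ "epsilon".toList ++ List.replicate n 'b')
          "epsilon".toList [] = List.replicate n 'a' ++ List.replicate n 'b' := by
        have := pv_replace_rep_mid n n 'a' 'b' 'e' "psilon".toList []
          (by decide) (by decide)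
        simpa using this
      rw [h2]
      have hlast : String.ofList (List.replicate n 'a' ++ List.replicate n 'b') = target := by
        rw [show List.replicate n 'a' ++ List.replicate n 'b' = s from hmem.symm]
        rw [hs, String.ofList_toList]
      simp [hlast]
  · -- not a member: both none
    rw [hcnt]
    rw [if_pos (by simpa [pvCanon] using hmem)]
    have hA : pvIsMember s = false := by
      rcases Bool.eq_false_or_eq_true (pvIsMember s) with h | h
      · exact absurd ((pv_member_iff s).1 h) hmem
      · exact h
    unfold pvDeriveA
    rw [hA]
    rfl
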